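-- pv_equiv track=rewrite | github.com/dmendelsohn/advent_of_code | python/src/year2024/day17/solution.py | get_quine_start_values
-- ===== SOURCE A (Python) =====
-- def get_possible_next_octet(a: int, output: int) -> list[int]:
--     """
--     Calculate the next 3 bits of a required to produce the requested output
--     Hard-codes the algorithm for my specific program input
--     """
--     possible_octets: list[int] = []
--     for octet in range(8):
--         b = octet ^ 1
--         c = ((a << 3) + octet) >> b
--         b = b ^ c ^ 4
--         if (b % 8) == output:
--             possible_octets.append(octet)
--
--     return possible_octets
--
-- def get_quine_start_values(carryin_a: int, outputs: list[int]) -> set[int]: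
--     if not outputs:
--         return {carryin_a}
--
--     *outputs, last_output = outputs
--     quine_start_values: set[int] = set()
--     for octet in get_possible_next_octet(carryin_a, last_output):
--         quine_start_values.update(get_quine_start_values((carryin_a << 3) + octet, outputs))
--     return quine_start_values
-- ===== SOURCE B (Python) =====
-- def get_possible_next_octet(a: int, output: int) -> list[int]:
--     possible_octets: list[int] = []
--     for octet in range(8):
--         b = octet ^ 1
--         c = ((a << 3) + octet) >> b
--         b = b ^ c ^ 4
--         if (b % 8) == output:
--             possible_octets.append(octet)
--     return possible_octets
--
-- def get_quine_start_values(carryin_a: int, outputs: list[int]) -> set[int]: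
--     frontier: set[int] = {carryin_a}
--     for output in reversed(outputs):
--         frontier = {(a << 3) + octet
--                     for a in frontier
--                     for octet in get_possible_next_octet(a, output)}
--     return frontier
-- ===== Notes on version B (the rewrite author's own statement) =====
-- stated objective: alternative
-- what changed: Replaced A's recursion over the outputs list (peel last element, recurse, union the results) by an iterative level-by-level frontier search: start from {carryin_a} and, for each output processed last-to-first, expand every candidate a in the frontier by its possible next octets into a new frontier set.
import Mathlib
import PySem

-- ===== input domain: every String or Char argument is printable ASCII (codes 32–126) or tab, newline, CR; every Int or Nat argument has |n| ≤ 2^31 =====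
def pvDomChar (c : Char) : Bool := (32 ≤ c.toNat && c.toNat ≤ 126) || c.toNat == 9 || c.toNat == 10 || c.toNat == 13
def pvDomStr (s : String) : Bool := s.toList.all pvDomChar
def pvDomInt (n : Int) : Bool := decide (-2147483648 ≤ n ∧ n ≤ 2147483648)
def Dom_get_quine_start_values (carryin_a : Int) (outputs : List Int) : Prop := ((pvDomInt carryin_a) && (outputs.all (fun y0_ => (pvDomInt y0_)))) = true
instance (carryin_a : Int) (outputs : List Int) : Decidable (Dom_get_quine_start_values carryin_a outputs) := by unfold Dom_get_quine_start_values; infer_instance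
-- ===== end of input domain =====

-- B replaces A's recursion over the outputs list by an iterative level-by-level frontier
-- expansion over a maintained candidate set (same cost; objective: alternative decomposition).
-- The Python return type is a set; the theorems below prove the two ports' insertion-order
-- element lists are equal (a stronger statement than set equality).

-- ===== PORT A =====
-- shared helper, identical in A and B (ported once)
def get_possible_next_octet (a : Int) (output : Int) : List Int :=
  (PySem.List.pyRange 0 8 1).foldl
    (fun possible_octets octet =>
      let b := PySem.Int.bxor octet 1
      -- b = octet ^ 1 ∈ [0, 8), so `.toNat` is exact for Python's `>>` here
      let c := ((a <<< (3:Nat)) + octet) >>> b.toNat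
      let b := PySem.Int.bxor (PySem.Int.bxor b c) 4
      if PySem.Int.mod b 8 = output then possible_octets ++ [octet] else possible_octets)
    []

def get_quine_start_values (carryin_a : Int) (outputs : List Int) : List Int :=
  if _h : outputs = [] then [carryin_a]
  else
    (get_possible_next_octet carryin_a (outputs.getLastD 0)).foldl
      (fun quine_start_values octet =>
        PySem.Set.update quine_start_values
          (get_quine_start_values ((carryin_a <<< (3:Nat)) + octet) outputs.dropLast))
      PySem.Set.empty
termination_by outputs.length
decreasing_by
  have : outputs.length ≠ 0 := fun hz => _h (List.eq_nil_of_length_eq_zero hz)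
  simp [List.length_dropLast]; omega

-- ===== PORT B =====
def get_quine_start_values_alt (carryin_a : Int) (outputs : List Int) : List Int :=
  outputs.reverse.foldl
    (fun frontier output =>
      frontier.foldl
        (fun s a =>
          (get_possible_next_octet a output).foldl
            (fun s octet => PySem.Set.add s ((a <<< (3:Nat)) + octet)) s)
        PySem.Set.empty)
    (PySem.Set.ofList [carryin_a])

-- ===== PRECONDITION & SPEC =====
def Spec_get_quine_start_values (carryin_a : Int) (outputs : List Int) (out : List Int) : Prop := out = get_quine_start_values_alt carryin_a outputs
instance (carryin_a : Int) (outputs : List Int) (out : List Int) : Decidable (Spec_get_quine_start_values carryin_a outputs out) := by unfold Spec_get_quine_start_values; infer_instance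

-- ===== CLAIM (what is proved, stated in full; the proofs are below) =====
def Claim_equal_get_quine_start_values : Prop := ∀ (carryin_a : Int) (outputs : List Int), Dom_get_quine_start_values carryin_a outputs → Spec_get_quine_start_values carryin_a outputs (get_quine_start_values carryin_a outputs)

-- ===== LEMMAS AND PROOFS =====

-- canonical DFS leaf list, recursing on the REVERSED outputs list
def pvLrev (a : Int) : List Int → List Int
  | [] => [a]
  | out :: rest =>
      (get_possible_next_octet a out).flatMap (fun o => pvLrev ((a <<< (3:Nat)) + o) rest)

def pvOnestep (a out : Int) : List Int :=
  (get_possible_next_octet a out).map (fun o => (a <<< (3:Nat)) + o)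

def pvLevel (F : List Int) (out : Int) : List Int :=
  F.flatMap (fun a => pvOnestep a out)

lemma pvShl3 (a : Int) : a <<< (3:Nat) = a * 8 := by
  simp [Int.shiftLeft_eq]

lemma gpno_eq_filter (a out : Int) :
    get_possible_next_octet a out =
      List.filter
        (fun octet => decide (PySem.Int.mod
          (PySem.Int.bxor (PySem.Int.bxor (PySem.Int.bxor octet 1)
            (((a <<< (3:Nat)) + octet) >>> (PySem.Int.bxor octet 1).toNat)) 4) 8 = out))
        [0,1,2,3,4,5,6,7] := by
  have hr : PySem.List.pyRange 0 8 1 = [0,1,2,3,4,5,6,7] := by decide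
  simp only [get_possible_next_octet, hr]
  rw [PySem.List.foldl_append_ite_eq_filter]
  simp

lemma mem_gpno {a out o : Int} (h : o ∈ get_possible_next_octet a out) : 0 ≤ o ∧ o < 8 := by
  rw [gpno_eq_filter] at h
  have := List.mem_of_mem_filter h
  fin_cases this <;> omega

lemma gpno_nodup (a out : Int) : (get_possible_next_octet a out).Nodup := by
  rw [gpno_eq_filter]
  exact List.Nodup.filter _ (by decide)

lemma onestep_nodup (a out : Int) : (pvOnestep a out).Nodup := by
  refine (List.nodup_map_iff_inj_on (gpno_nodup a out)).mpr ?_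
  intro x hx y hy hxy
  have hxb := mem_gpno hx; have hyb := mem_gpno hy
  rw [pvShl3] at hxy; omega

lemma onestep_disjoint {a1 a2 : Int} (out : Int) (h : a1 ≠ a2) :
    ∀ x, x ∈ pvOnestep a1 out → x ∈ pvOnestep a2 out → False := by
  intro x h1 h2
  simp only [pvOnestep, List.mem_map] at h1 h2
  obtain ⟨o1, ho1, rfl⟩ := h1
  obtain ⟨o2, ho2, he⟩ := h2
  have hb1 := mem_gpno ho1; have hb2 := mem_gpno ho2
  rw [pvShl3, pvShl3] at he; omega

lemma level_nodup {F : List Int} (out : Int) (hF : F.Nodup) : (pvLevel F out).Nodup := by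
  rw [pvLevel, List.nodup_flatMap]
  refine ⟨fun a _ => onestep_nodup a out, ?_⟩
  refine hF.imp ?_
  intro a b hab
  exact List.disjoint_left.mpr (fun {x} hx hx' => onestep_disjoint out hab x hx hx')

lemma Lrev_disjoint : ∀ (l : List Int) (a1 a2 : Int), a1 ≠ a2 →
    ∀ x, x ∈ pvLrev a1 l → x ∈ pvLrev a2 l → False := by
  intro l
  induction l with
  | nil => intro a1 a2 h x h1 h2; simp [pvLrev] at h1 h2; omega
  | cons out rest ih =>
    intro a1 a2 h x h1 h2
    simp only [pvLrev, List.mem_flatMap] at h1 h2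
    obtain ⟨o1, ho1, hx1⟩ := h1
    obtain ⟨o2, ho2, hx2⟩ := h2
    have hb1 := mem_gpno ho1; have hb2 := mem_gpno ho2
    by_cases hc : (a1 <<< (3:Nat)) + o1 = (a2 <<< (3:Nat)) + o2
    · rw [pvShl3, pvShl3] at hc; omega
    · exact ih _ _ hc x hx1 hx2

lemma Lrev_nodup : ∀ (l : List Int) (a : Int), (pvLrev a l).Nodup := by
  intro l
  induction l with
  | nil => intro a; simp [pvLrev]
  | cons out rest ih =>
    intro a
    rw [pvLrev, List.nodup_flatMap]
    refine ⟨fun o _ => ih _, ?_⟩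
    refine (gpno_nodup a out).imp ?_
    intro o1 o2 h12
    have hc : (a <<< (3:Nat)) + o1 ≠ (a <<< (3:Nat)) + o2 := by omega
    exact List.disjoint_left.mpr (fun {x} hx hx' => Lrev_disjoint rest _ _ hc x hx hx')

-- folding Set.update over pairwise-fresh nodup blocks is concatenation
lemma foldl_update_eq_flatMap {α : Type} (f : α → List Int) :
    ∀ (l : List α) (s : List Int), (s ++ l.flatMap f).Nodup →
      l.foldl (fun s o => PySem.Set.update s (f o)) s = s ++ l.flatMap f := by
  intro l
  induction l with
  | nil => intro s h; simp
  | cons o rest ih =>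
    intro s h
    simp only [List.flatMap_cons] at h ⊢
    obtain ⟨hs, hfr, hdisj⟩ := List.nodup_append.mp h
    obtain ⟨hfo, hrest, _⟩ := List.nodup_append.mp hfr
    have hstep : PySem.Set.update s (f o) = s ++ f o := by
      refine PySem.Set.update_eq_append_of_disjoint s (f o) hfo ?_
      intro x hx hxs
      exact hdisj x hxs x (by simp [hx]) rfl
    rw [List.foldl_cons, hstep, ih (s ++ f o) (by simpa [List.append_assoc] using h),
      List.append_assoc]

-- ==== A-side: A = Lrev on the reversed list ====
lemma A_eq_Lrev : ∀ (l : List Int) (a : Int),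
    get_quine_start_values a l.reverse = pvLrev a l := by
  intro l
  induction l with
  | nil => intro a; simp [get_quine_start_values, pvLrev]
  | cons out rest ih =>
    intro a
    have hne : (out :: rest).reverse ≠ [] := by simp
    rw [get_quine_start_values]
    simp only [List.reverse_cons] at hne ⊢
    rw [dif_neg hne]
    have hlast : (rest.reverse ++ [out]).getLastD 0 = out := by simp
    have hdrop : (rest.reverse ++ [out]).dropLast = rest.reverse := by simp
    rw [hlast, hdrop]
    have hbody :
        (get_possible_next_octet a out).foldl
          (fun s o => PySem.Set.update s (get_quine_start_values ((a <<< (3:Nat)) + o) rest.reverse))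
          PySem.Set.empty
        = (get_possible_next_octet a out).foldl
          (fun s o => PySem.Set.update s (pvLrev ((a <<< (3:Nat)) + o) rest)) PySem.Set.empty := by
      refine PySem.List.foldl_congr_mem _ _ _ _ (fun s o _ => ?_)
      rw [ih]
    rw [hbody]
    have hnd : (([] : List Int) ++ (get_possible_next_octet a out).flatMap
        (fun o => pvLrev ((a <<< (3:Nat)) + o) rest)).Nodup := by
      simpa using (Lrev_nodup (out :: rest) a)
    have := foldl_update_eq_flatMap (fun o => pvLrev ((a <<< (3:Nat)) + o) rest)
      (get_possible_next_octet a out) [] hnd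
    simpa [pvLrev, PySem.Set.empty] using this

-- ==== B-side: the frontier fold = Lrev ====
lemma inner_fold_eq_update (a out : Int) (s : List Int) :
    (get_possible_next_octet a out).foldl
      (fun s octet => PySem.Set.add s ((a <<< (3:Nat)) + octet)) s
    = PySem.Set.update s (pvOnestep a out) := by
  rw [pvOnestep, PySem.Set.update_map_eq_foldl_add]

lemma setLevel_eq_level {F : List Int} (out : Int) (hF : F.Nodup) :
    F.foldl
      (fun s a =>
        (get_possible_next_octet a out).foldl
          (fun s octet => PySem.Set.add s ((a <<< (3:Nat)) + octet)) s)
      PySem.Set.empty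
    = pvLevel F out := by
  have h1 : F.foldl
      (fun s a =>
        (get_possible_next_octet a out).foldl
          (fun s octet => PySem.Set.add s ((a <<< (3:Nat)) + octet)) s)
      PySem.Set.empty
      = F.foldl (fun s a => PySem.Set.update s (pvOnestep a out)) [] := by
    refine PySem.List.foldl_congr_mem _ _ _ _ (fun s a _ => ?_)
    exact inner_fold_eq_update a out s
  rw [h1]
  have hnd : (([] : List Int) ++ F.flatMap (fun a => pvOnestep a out)).Nodup := by
    simpa [pvLevel] using level_nodup out hF
  simpa [pvLevel] using foldl_update_eq_flatMap (fun a => pvOnestep a out) F [] hnd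

lemma foldl_setLevel_eq_foldl_level : ∀ (l : List Int) (F : List Int), F.Nodup →
    l.foldl
      (fun frontier output =>
        frontier.foldl
          (fun s a =>
            (get_possible_next_octet a output).foldl
              (fun s octet => PySem.Set.add s ((a <<< (3:Nat)) + octet)) s)
          PySem.Set.empty)
      F
    = l.foldl pvLevel F := by
  intro l
  induction l with
  | nil => intro F _; rfl
  | cons out rest ih =>
    intro F hF
    simp only [List.foldl_cons]
    rw [setLevel_eq_level out hF]
    exact ih _ (level_nodup out hF)

lemma foldl_level_flatMap : ∀ (l : List Int) (F : List Int),
    l.foldl pvLevel F = F.flatMap (fun a => l.foldl pvLevel [a]) := by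
  intro l
  induction l with
  | nil => intro F; simp
  | cons out rest ih =>
    intro F
    simp only [List.foldl_cons]
    rw [ih (pvLevel F out)]
    have h1 : pvLevel F out = F.flatMap (fun a => pvOnestep a out) := rfl
    rw [h1, List.flatMap_assoc]
    refine List.flatMap_congr ?_
    intro a _
    have h2 : pvLevel [a] out = pvOnestep a out := by simp [pvLevel]
    rw [h2, ← ih (pvOnestep a out)]

lemma foldl_level_single_eq_Lrev : ∀ (l : List Int) (a : Int),
    l.foldl pvLevel [a] = pvLrev a l := by
  intro l
  induction l with
  | nil => intro a; simp [pvLrev]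
  | cons out rest ih =>
    intro a
    simp only [List.foldl_cons]
    have h2 : pvLevel [a] out = pvOnestep a out := by simp [pvLevel]
    rw [h2, foldl_level_flatMap]
    rw [pvLrev, pvOnestep, List.flatMap_map]
    exact List.flatMap_congr (fun o _ => ih _)

-- ===== VERDICT (by name: the statement is the Claim_ definition above) =====
theorem get_quine_start_values_spec : Claim_equal_get_quine_start_values := by
  intro carryin_a outputs _
  unfold Spec_get_quine_start_values get_quine_start_values_alt
  have hA : get_quine_start_values carryin_a outputs = pvLrev carryin_a outputs.reverse := by
    have := A_eq_Lrev outputs.reverse carryin_a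
    simpa using this
  have hO : PySem.Set.ofList [carryin_a] = [carryin_a] := rfl
  rw [hA, hO, foldl_setLevel_eq_foldl_level outputs.reverse [carryin_a] (by simp),
    foldl_level_single_eq_Lrev]
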